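-- pv_equiv track=rewrite | github.com/ShySec/cryptanalysis | Classic/Monoalphabetic Substitution/solve.py | backptr_regex
-- ===== SOURCE A (Python) =====
-- def backptr_pattern(data):
-- 	refs={}
-- 	refdata=[]
-- 	for index,letter in enumerate(data):
-- 		ref=refs.get(letter,index)
-- 		if index-ref>255: ref=index
-- 		refdata.append(index-ref)
-- 		refs[letter]=index
-- 	return refdata
--
-- def backptr_regex(data):
-- 	regex = ''
-- 	groups = 1
-- 	mapping = []
-- 	bref = backptr_pattern(data)
-- 	for index,ref in enumerate(bref):
-- 		if ref > 0: regex += '\\x%02x'%ref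
-- 		else:
-- 			regex += '[\\x00\\x%02x-\\xff]'%(index+1)
-- 			mapping.append(data[index])
-- 	return regex,mapping
-- ===== SOURCE B (Python) =====
-- def backptr_regex(data):
--     # Group the occurrence indices of each letter, then derive each position's
--     # back-distance from consecutive occurrences within its own group.
--     occs = {}
--     for i, letter in enumerate(data):
--         occs.setdefault(letter, []).append(i)
--     n = len(data)
--     delta = [0] * n
--     for idxs in occs.values():
--         for prev, cur in zip(idxs, idxs[1:]):
--             if cur - prev <= 255:
--                 delta[cur] = cur - prev
--     regex = ''.join('\\x%02x' % d if d > 0 else '[\\x00\\x%02x-\\xff]' % (i + 1)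
--                     for i, d in enumerate(delta))
--     mapping = [data[i] for i in range(n) if delta[i] == 0]
--     return regex, mapping
-- ===== Notes on version B (the rewrite author's own statement) =====
-- stated objective: alternative
-- what changed: B replaces A's sequential last-occurrence dict pass with a different algorithm: it groups each letter's occurrence indices, derives every back-distance from consecutive pairs within each group written into a pre-allocated delta array, and then renders the regex and mapping from that array.
import Mathlib
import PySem

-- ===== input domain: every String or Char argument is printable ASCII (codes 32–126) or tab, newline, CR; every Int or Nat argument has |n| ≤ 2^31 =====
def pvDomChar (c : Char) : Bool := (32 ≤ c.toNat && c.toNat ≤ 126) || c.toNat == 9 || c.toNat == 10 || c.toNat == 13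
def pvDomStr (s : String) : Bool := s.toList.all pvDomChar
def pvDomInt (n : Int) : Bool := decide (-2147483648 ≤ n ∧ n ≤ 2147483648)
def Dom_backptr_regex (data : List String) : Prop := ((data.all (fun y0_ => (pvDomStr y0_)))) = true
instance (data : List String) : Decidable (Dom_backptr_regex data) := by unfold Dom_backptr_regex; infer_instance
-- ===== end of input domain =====

-- B is a different algorithm: instead of A's sequential last-occurrence dict, it groups each
-- letter's occurrence indices, derives every back-distance from consecutive occurrence pairs
-- written into a pre-allocated delta array, and renders regex and mapping from that array.

-- '%02x' % n : lowercase hex, zero-padded to width 2 (shared by both ports — both Pythons use this format)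
def pvHex02 (n : Int) : String :=
  let ds := if n < 0 then '-' :: Nat.toDigits 16 (-n).toNat else Nat.toDigits 16 n.toNat
  String.ofList (if ds.length < 2 then '0' :: ds else ds)

-- ===== PORT A =====
def backptr_pattern (data : List String) : List Int :=
  (PySem.List.enumerate data 0).foldl
    (fun (st : PySem.Dict String Int × List Int) il =>
      let ref := st.1.getD il.2 il.1
      let ref := if il.1 - ref > 255 then il.1 else ref
      (st.1.insert il.2 il.1, st.2 ++ [il.1 - ref]))
    (PySem.Dict.empty, []) |>.2

-- ('groups = 1' in the Python is never used nor returned; omitted.)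
-- data[index] is always in range (index enumerates bref, |bref| = |data|), so pyGetD's default "" is never used.
def backptr_regex (data : List String) : String × List String :=
  let bref := backptr_pattern data
  (PySem.List.enumerate bref 0).foldl
    (fun (st : String × List String) ir =>
      if ir.2 > 0 then (st.1 ++ ("\\x" ++ pvHex02 ir.2), st.2)
      else (st.1 ++ ("[\\x00\\x" ++ pvHex02 (ir.1 + 1) ++ "-\\xff]"),
            st.2 ++ [PySem.List.pyGetD data ir.1 ""]))
    ("", [])

-- ===== PORT B =====
-- transliteration of Source B: occs = per-letter occurrence-index lists (setdefault+append =
-- Dict.modify with default []); delta = [0]*n with in-range assignments delta[cur] = cur-prev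
-- (pySetD; cur is a valid nonnegative index); idxs[1:] = slice; the regex is a join over
-- enumerate(delta), the mapping a comprehension over range(n).
def backptr_regex_alt (data : List String) : String × List String :=
  let occs := (PySem.List.enumerate data 0).foldl
    (fun (occs : PySem.Dict String (List Int)) il => occs.modify il.2 [] (· ++ [il.1]))
    PySem.Dict.empty
  let delta0 : List Int := List.replicate data.length 0
  let delta := occs.values.foldl
    (fun (delta : List Int) idxs =>
      (idxs.zip (PySem.List.slice idxs (some 1) none)).foldl
        (fun (delta : List Int) pc =>
          if pc.2 - pc.1 ≤ 255 then PySem.List.pySetD delta pc.2 (pc.2 - pc.1) else delta)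
        delta)
    delta0
  let regex := PySem.Str.join "" ((PySem.List.enumerate delta 0).map
    (fun id => if id.2 > 0 then "\\x" ++ pvHex02 id.2
               else "[\\x00\\x" ++ pvHex02 (id.1 + 1) ++ "-\\xff]"))
  let mapping := ((PySem.List.pyRange 0 data.length 1).filter
      (fun i => PySem.List.pyGetD delta i 0 == 0)).map
    (fun i => PySem.List.pyGetD data i "")
  (regex, mapping)

-- ===== PRECONDITION & SPEC =====
def Spec_backptr_regex (data : List String) (out : String × List String) : Prop := out = backptr_regex_alt data
instance (data : List String) (out : String × List String) : Decidable (Spec_backptr_regex data out) := by unfold Spec_backptr_regex; infer_instance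

-- ===== CLAIM (what is proved, stated in full; the proofs are below) =====
def Claim_equal_backptr_regex : Prop := ∀ (data : List String), Dom_backptr_regex data → Spec_backptr_regex data (backptr_regex data)

-- ===== LEMMAS AND PROOFS =====

-- the deltas A's first pass produces for the suffix `rest` starting at index i with dict `refs`
def pvDeltas (i : Int) (refs : PySem.Dict String Int) : List String → List Int
  | [] => []
  | l :: rest =>
    let ref := refs.getD l i
    let ref := if i - ref > 255 then i else ref
    (i - ref) :: pvDeltas (i + 1) (refs.insert l i) rest

-- index of the last occurrence of letter l strictly before position j (none if no occurrence)
def pvPrevL (data : List String) (l : String) : Nat → Option Nat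
  | 0 => none
  | j + 1 => if data.getD j "" == l then some j else pvPrevL data l j

-- the back-delta both programs assign to position j
def pvDval (data : List String) (j : Nat) : Int :=
  match pvPrevL data (data.getD j "") j with
  | some p => if (j : Int) - p ≤ 255 then (j : Int) - p else 0
  | none => 0

def pvDspec (data : List String) : List Int := (List.range data.length).map (pvDval data)

-- the occurrence indices of letter l, in increasing order
def pvOcc (data : List String) (l : String) : List Int :=
  ((PySem.List.enumerate data 0).filter (fun p => p.2 == l)).map (·.1)

theorem pv_join_nil : PySem.Str.join "" [] = "" := by decide

theorem pv_flat_inter (a : List Char) (l : List (List Char)) :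
    (List.intersperse [] (a :: l)).flatten = a ++ (List.intersperse [] l).flatten := by
  cases l with
  | nil => simp
  | cons b t => simp [List.intersperse]

theorem pv_join_empty_cons (p : String) (ps : List String) :
    PySem.Str.join "" (p :: ps) = p ++ PySem.Str.join "" ps := by
  have he : "".toList = ([] : List Char) := by decide
  simp only [PySem.Str.join, PySem.Chars.join, List.intercalate, List.map_cons, he]
  rw [pv_flat_inter, String.ofList_append, String.ofList_toList]

-- A's first loop is pvDeltas
theorem pv_pattern_fold (rest : List String) :
    ∀ (i : Int) (refs : PySem.Dict String Int) (acc : List Int),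
    ((PySem.List.enumerate rest i).foldl
      (fun (st : PySem.Dict String Int × List Int) il =>
        let ref := st.1.getD il.2 il.1
        let ref := if il.1 - ref > 255 then il.1 else ref
        (st.1.insert il.2 il.1, st.2 ++ [il.1 - ref]))
      (refs, acc)).2 = acc ++ pvDeltas i refs rest := by
  induction rest with
  | nil => intro i refs acc; simp [pvDeltas, PySem.List.enumerate]
  | cons l rest ih =>
    intro i refs acc
    rw [PySem.List.enumerate_cons]
    simp only [List.foldl_cons, pvDeltas, ih]
    simp

theorem pvPrevL_prop (data : List String) (l : String) :
    ∀ (j : Nat) (p : Nat), pvPrevL data l j = some p →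
      p < j ∧ data.getD p "" = l := by
  intro j
  induction j with
  | zero => intro p h; simp [pvPrevL] at h
  | succ j ih =>
    intro p h
    unfold pvPrevL at h
    by_cases hb : (data.getD j "" == l) = true
    · rw [if_pos hb] at h
      injection h with h
      subst h
      exact ⟨Nat.lt_succ_self _, by simpa using hb⟩
    · rw [if_neg hb] at h
      obtain ⟨h1, h2⟩ := ih p h
      exact ⟨Nat.lt_succ_of_lt h1, h2⟩

-- pvDeltas with a dict recording exactly the previous occurrences is pvDval position by position
theorem pvDeltas_spec (data : List String) (rest : List String) :
    ∀ (n : Nat) (refs : PySem.Dict String Int),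
      data.drop n = rest →
      (∀ l, refs.get? l = (pvPrevL data l n).map (fun p => (p : Int))) →
      pvDeltas (n : Int) refs rest = (List.range rest.length).map (fun k => pvDval data (n + k)) := by
  induction rest with
  | nil => intro n refs _ _; simp [pvDeltas]
  | cons x rest ih =>
    intro n refs hd hr
    have hidx : data[n]? = some x := by
      have h0 : (data.drop n)[0]? = some x := by rw [hd]; rfl
      simpa [List.getElem?_drop] using h0
    have hx : data.getD n "" = x := by simp [List.getD_eq_getElem?_getD, hidx]
    have hd2 : data.drop (n + 1) = rest := by
      have h1 := congrArg (List.drop 1) hd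
      simpa [List.drop_drop, Nat.add_comm] using h1
    have hr2 : ∀ l, (refs.insert x (n : Int)).get? l
        = (pvPrevL data l (n + 1)).map (fun p => (p : Int)) := by
      intro l
      rw [PySem.Dict.get?_insert]
      have hpv : pvPrevL data l (n + 1)
          = if data.getD n "" == l then some n else pvPrevL data l n := rfl
      by_cases hl : l = x
      · subst hl
        rw [if_pos rfl, hpv, if_pos (by rw [hx]; simp)]
        simp
      · have hc : (data.getD n "" == l) = false := by
          rw [hx]
          exact beq_eq_false_iff_ne.mpr (Ne.symm hl)
        rw [if_neg hl, hpv, if_neg (by rw [hc]; simp), hr l]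
    have hgd : refs.getD x (n : Int) = ((pvPrevL data x n).map (fun p => (p : Int))).getD n := by
      rw [PySem.Dict.getD_eq_get?_getD, hr x]
    have hcast : ((n : Int) + 1) = ((n + 1 : Nat) : Int) := by push_cast; ring
    have htail : pvDeltas ((n : Int) + 1) (refs.insert x (n : Int)) rest
        = (List.range rest.length).map (fun k => pvDval data ((n + 1) + k)) := by
      rw [hcast]; exact ih (n + 1) (refs.insert x (n : Int)) hd2 hr2
    have htail2 : (List.range rest.length).map (fun k => pvDval data ((n + 1) + k))
        = (List.range rest.length).map (fun k => pvDval data (n + Nat.succ k)) := by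
      apply List.map_congr_left
      intro k _
      congr 1
      omega
    unfold pvDeltas
    simp only [List.length_cons, List.range_succ_eq_map, List.map_cons, List.map_map]
    rw [htail, htail2, hgd]
    simp only [Nat.add_zero]
    congr 1
    unfold pvDval
    rw [hx]
    cases hp : pvPrevL data x n with
    | none => simp
    | some p =>
      simp
      split_ifs <;> omega

-- A's second loop: string concatenation is a join of pieces, the mapping a filterMap
theorem pvDeltas_zero (data : List String) :
    pvDeltas 0 PySem.Dict.empty data = pvDspec data := by
  have h := pvDeltas_spec data data 0 PySem.Dict.empty (by simp)
    (fun l => by simp [PySem.Dict.get?_empty, pvPrevL])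
  unfold pvDspec
  simpa using h

theorem pv_A_second (data : List String) (D : List Int) :
    ∀ (s : Int) (rAcc : String) (mAcc : List String),
    (PySem.List.enumerate D s).foldl
      (fun (st : String × List String) ir =>
        if ir.2 > 0 then (st.1 ++ ("\\x" ++ pvHex02 ir.2), st.2)
        else (st.1 ++ ("[\\x00\\x" ++ pvHex02 (ir.1 + 1) ++ "-\\xff]"),
              st.2 ++ [PySem.List.pyGetD data ir.1 ""]))
      (rAcc, mAcc)
    = (rAcc ++ PySem.Str.join "" ((PySem.List.enumerate D s).map
        (fun id => if id.2 > 0 then "\\x" ++ pvHex02 id.2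
                   else "[\\x00\\x" ++ pvHex02 (id.1 + 1) ++ "-\\xff]")),
       mAcc ++ (PySem.List.enumerate D s).filterMap
        (fun id => if id.2 > 0 then none else some (PySem.List.pyGetD data id.1 ""))) := by
  induction D with
  | nil => intro s rAcc mAcc; simp [PySem.List.enumerate, pv_join_nil]
  | cons d D ih =>
    intro s rAcc mAcc
    rw [PySem.List.enumerate_cons]
    simp only [List.foldl_cons, List.map_cons, List.filterMap_cons]
    by_cases hd : d > 0
    · simp only [if_pos hd]
      rw [ih (s + 1), pv_join_empty_cons]
      simp [String.append_assoc]
    · simp only [if_neg hd]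
      rw [ih (s + 1), pv_join_empty_cons]
      simp [String.append_assoc]

-- ----- B-side machinery -----

-- one delta-array write
def pvStep (L : List Int) (pc : Int × Int) : List Int :=
  PySem.List.pySetD L pc.2 (pc.2 - pc.1)

-- the (kept) consecutive-occurrence writes of letter l
def pvGW (data : List String) (l : String) : List (Int × Int) :=
  ((pvOcc data l).zip (pvOcc data l).tail).filter (fun pc => decide (pc.2 - pc.1 ≤ 255))

-- all writes, grouped by letter in first-occurrence order
def pvWS (data : List String) : List (Int × Int) :=
  ((PySem.Set.ofList data).map (pvGW data)).flatten

-- B's grouping dict looked up at l is the occurrence list of l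
theorem pv_occs_getD (data : List String) (l : String) :
    ((PySem.List.enumerate data 0).foldl
      (fun (occs : PySem.Dict String (List Int)) il => occs.modify il.2 [] (· ++ [il.1]))
      PySem.Dict.empty).getD l [] = pvOcc data l := by
  have h1 : (PySem.List.enumerate data 0).foldl
      (fun (occs : PySem.Dict String (List Int)) il => occs.modify il.2 [] (· ++ [il.1]))
      PySem.Dict.empty
      = ((PySem.List.enumerate data 0).map Prod.swap).foldl
        (fun (d : PySem.Dict String (List Int)) p => d.modify p.1 [] (· ++ [p.2]))
        PySem.Dict.empty := by
    rw [List.foldl_map]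
    rfl
  rw [h1, PySem.Dict.getD_foldl_modify_append]
  simp [pvOcc, List.filter_map, List.map_map, PySem.Dict.getD_empty]
  rfl

theorem pv_occs_keys (data : List String) :
    ((PySem.List.enumerate data 0).foldl
      (fun (occs : PySem.Dict String (List Int)) il => occs.modify il.2 [] (· ++ [il.1]))
      PySem.Dict.empty).keys = PySem.Set.ofList data := by
  have h := PySem.Dict.keys_foldl_modify_key (PySem.List.enumerate data 0)
    (fun il => il.2) [] (fun _ il => (· ++ [il.1])) PySem.Dict.empty
  rw [h]
  rw [PySem.List.map_snd_enumerate]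
  rw [PySem.Set.ofList_eq_foldl]
  rfl

theorem pv_occs_keys_nodup (data : List String) :
    ((PySem.List.enumerate data 0).foldl
      (fun (occs : PySem.Dict String (List Int)) il => occs.modify il.2 [] (· ++ [il.1]))
      PySem.Dict.empty).keys.Nodup := by
  exact PySem.Dict.nodup_keys_foldl_modify_key (PySem.List.enumerate data 0)
    (fun il => il.2) [] (fun _ (il : Int × String) => (· ++ [il.1]))
    PySem.Dict.empty (by simp)

-- membership in the occurrence list
theorem pv_mem_occ (data : List String) (l : String) (x : Int) :
    x ∈ pvOcc data l ↔ ∃ k : Nat, k < data.length ∧ x = (k : Int) ∧ data.getD k "" = l := by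
  unfold pvOcc
  simp only [List.mem_map, List.mem_filter]
  constructor
  · rintro ⟨p, ⟨hpm, hpl⟩, hpx⟩
    obtain ⟨k, hk, hpe⟩ := (PySem.List.mem_enumerate_iff _ _ _).mp hpm
    refine ⟨k, hk, ?_, ?_⟩
    · rw [← hpx, hpe]; simp
    · have : p.2 = l := by simpa using hpl
      rw [hpe] at this
      simp at this
      rw [List.getD_eq_getElem?_getD]
      simp [List.getElem?_eq_getElem hk, this]
  · rintro ⟨k, hk, hx, hdl⟩
    refine ⟨((k : Int), data[k]), ⟨?_, ?_⟩, by simpa using hx.symm⟩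
    · exact (PySem.List.mem_enumerate_iff _ _ _).mpr ⟨k, hk, by simp⟩
    · have : data[k] = l := by
        rw [List.getD_eq_getElem?_getD] at hdl
        simpa [List.getElem?_eq_getElem hk] using hdl
      simpa using this

theorem pv_occ_pairwise (data : List String) (l : String) :
    (pvOcc data l).Pairwise (· < ·) := by
  unfold pvOcc
  rw [List.pairwise_map]
  exact (PySem.List.pairwise_lt_enumerate data 0).filter _

-- adjacent pairs of a list, by index
theorem pv_mem_zip_tail {α : Type} (xs : List α) (p c : α) :
    (p, c) ∈ xs.zip xs.tail ↔ ∃ i : Nat, ∃ _ : i + 1 < xs.length, xs[i] = p ∧ xs[i + 1] = c := by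
  rw [List.mem_iff_getElem]
  constructor
  · rintro ⟨i, hi, he⟩
    rw [List.length_zip, List.length_tail] at hi
    have hi1 : i + 1 < xs.length := by omega
    refine ⟨i, hi1, ?_, ?_⟩
    · have := congrArg Prod.fst he
      rw [List.getElem_zip] at this
      simpa using this
    · have := congrArg Prod.snd he
      rw [List.getElem_zip] at this
      simp only [List.getElem_tail] at this
      simpa using this
  · rintro ⟨i, hi1, h1, h2⟩
    refine ⟨i, by rw [List.length_zip, List.length_tail]; omega, ?_⟩
    rw [List.getElem_zip]
    simp only [List.getElem_tail]
    rw [h1, h2]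

-- in a strictly increasing list, adjacency = membership with nothing in between
theorem pv_adj_iff (xs : List Int) (hs : xs.Pairwise (· < ·)) (a b : Int) :
    (a, b) ∈ xs.zip xs.tail ↔
      a ∈ xs ∧ b ∈ xs ∧ a < b ∧ ∀ y ∈ xs, ¬(a < y ∧ y < b) := by
  have hmono := List.pairwise_iff_getElem.mp hs
  rw [pv_mem_zip_tail]
  constructor
  · rintro ⟨i, hi1, ha, hb⟩
    have hilt : i < xs.length := by omega
    refine ⟨ha ▸ List.getElem_mem hilt, hb ▸ List.getElem_mem hi1, ?_, ?_⟩
    · rw [← ha, ← hb]; exact hmono i (i + 1) hilt hi1 (by omega)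
    · rintro y hy ⟨hay, hyb⟩
      obtain ⟨j, hj, hxj⟩ := List.mem_iff_getElem.mp hy
      rcases Nat.lt_trichotomy j i with hje | hje | hje
      · have := hmono j i hj hilt hje
        rw [hxj, ha] at this
        exact absurd hay (by omega)
      · subst hje
        rw [hxj] at ha
        omega
      · have hij1 : i + 1 ≤ j := hje
        rcases Nat.eq_or_lt_of_le hij1 with hje1 | hje1
        · subst hje1
          rw [hb] at hxj
          omega
        · have := hmono (i + 1) j hi1 hj hje1
          rw [hxj, hb] at this
          omega
  · rintro ⟨ha, hb, hab, hbet⟩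
    obtain ⟨i, hi, hxi⟩ := List.mem_iff_getElem.mp ha
    obtain ⟨j, hj, hxj⟩ := List.mem_iff_getElem.mp hb
    have hij : i < j := by
      rcases Nat.lt_trichotomy i j with h | h | h
      · exact h
      · subst h; rw [hxi] at hxj; omega
      · have := hmono j i hj hi h
        rw [hxi, hxj] at this
        omega
    have hj1 : j = i + 1 := by
      by_contra hne
      have hij1 : i + 1 < j := by omega
      have hy : xs[i + 1] ∈ xs := List.getElem_mem (by omega)
      refine hbet xs[i + 1] hy ⟨?_, ?_⟩
      · rw [← hxi]; exact hmono i (i + 1) hi (by omega) (by omega)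
      · rw [← hxj]; exact hmono (i + 1) j (by omega) hj hij1
    subst hj1
    exact ⟨i, hj, hxi, hxj⟩

-- pvPrevL returns the LAST previous occurrence: nothing of letter l lies strictly between
theorem pvPrevL_maximal (data : List String) (l : String) :
    ∀ (j p : Nat), pvPrevL data l j = some p →
      ∀ q : Nat, p < q → q < j → data.getD q "" ≠ l := by
  intro j
  induction j with
  | zero => intro p h; simp [pvPrevL] at h
  | succ j ih =>
    intro p h q hpq hqj
    unfold pvPrevL at h
    by_cases hb : (data.getD j "" == l) = true
    · rw [if_pos hb] at h
      injection h with h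
      omega
    · rw [if_neg hb] at h
      rcases Nat.lt_or_ge q j with hq | hq
      · exact ih p h q hpq hq
      · have : q = j := by omega
        subst this
        intro hc
        exact hb (beq_iff_eq.mpr hc)

-- conversely, an occurrence with nothing in between IS pvPrevL's answer
theorem pvPrevL_complete (data : List String) (l : String) :
    ∀ (j p : Nat), p < j → data.getD p "" = l →
      (∀ q : Nat, p < q → q < j → data.getD q "" ≠ l) →
      pvPrevL data l j = some p := by
  intro j
  induction j with
  | zero => intro p h; omega
  | succ j ih =>
    intro p hpj hpl hbet
    unfold pvPrevL
    rcases Nat.lt_or_ge p j with hq | hq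
    · rw [if_neg ?_]
      · exact ih p hq hpl (fun q h1 h2 => hbet q h1 (by omega))
      · intro hb
        exact hbet j hq (by omega) (by simpa using hb)
    · have : p = j := by omega
      subst this
      rw [if_pos (beq_iff_eq.mpr hpl)]

theorem pv_stepfold_length (ps : List (Int × Int)) :
    ∀ L : List Int, (ps.foldl pvStep L).length = L.length := by
  induction ps with
  | nil => intro L; rfl
  | cons pc ps ih =>
    intro L
    rw [List.foldl_cons, ih]
    unfold pvStep
    exact PySem.List.length_pySetD _ _ _

-- positions never written stay put
theorem pv_stepfold_untouched (ps : List (Int × Int)) :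
    ∀ (L : List Int) (j : Nat), (∀ pc ∈ ps, 0 ≤ pc.2 ∧ pc.2 ≠ (j : Int)) →
      (ps.foldl pvStep L).getD j 0 = L.getD j 0 := by
  induction ps with
  | nil => intro L j _; rfl
  | cons pc ps ih =>
    intro L j h
    rw [List.foldl_cons, ih _ j (fun x hx => h x (List.mem_cons_of_mem _ hx))]
    unfold pvStep
    have hpos : 0 ≤ pc.2 := (h pc List.mem_cons_self).1
    rw [PySem.List.pySetD_of_nonneg _ _ hpos]
    have hne : pc.2.toNat ≠ j := by
      have := (h pc List.mem_cons_self).2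
      omega
    rw [List.getD_eq_getElem?_getD, List.getD_eq_getElem?_getD, List.getElem?_set]
    rw [if_neg hne]

-- the value at a written position is its (unique) write
theorem pv_stepfold_getD (ps : List (Int × Int)) :
    ∀ (L : List Int) (j : Nat),
      (∀ pc ∈ ps, 0 ≤ pc.2 ∧ pc.2 < (L.length : Int)) →
      (ps.map (·.2)).Nodup →
      (ps.foldl pvStep L).getD j 0
        = (ps.find? (fun pc => pc.2 == (j : Int))).elim (L.getD j 0) (fun pc => pc.2 - pc.1) := by
  induction ps with
  | nil => intro L j _ _; rfl
  | cons pc ps ih =>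
    intro L j hb hnd
    rw [List.foldl_cons]
    by_cases hj : (pc.2 == (j : Int)) = true
    · rw [List.find?_cons_of_pos (p := fun pc : Int × Int => pc.2 == (j : Int)) hj]
      have hj' : pc.2 = (j : Int) := by simpa using hj
      have hnotin : ∀ x ∈ ps, 0 ≤ x.2 ∧ x.2 ≠ (j : Int) := by
        intro x hx
        refine ⟨(hb x (List.mem_cons_of_mem _ hx)).1, fun hc => ?_⟩
        have : pc.2 ∉ ps.map (·.2) := (List.nodup_cons.mp hnd).1
        exact this (by rw [hj', ← hc]; exact List.mem_map_of_mem hx)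
      rw [pv_stepfold_untouched ps _ j hnotin]
      unfold pvStep
      have h0 : 0 ≤ pc.2 := (hb pc List.mem_cons_self).1
      have hlt : pc.2 < (L.length : Int) := (hb pc List.mem_cons_self).2
      rw [PySem.List.pySetD_of_nonneg _ _ h0]
      have hjn : pc.2.toNat = j := by omega
      rw [List.getD_eq_getElem?_getD, List.getElem?_set, if_pos hjn]
      rw [if_pos (by omega)]
      simp
    · rw [List.find?_cons_of_neg (p := fun pc : Int × Int => pc.2 == (j : Int)) hj]
      have hlen : (pvStep L pc).length = L.length := by
        unfold pvStep; exact PySem.List.length_pySetD _ _ _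
      rw [ih (pvStep L pc) j (by rw [hlen]; exact fun x hx => hb x (List.mem_cons_of_mem _ hx))
        (List.nodup_cons.mp hnd).2]
      have hne : pc.2 ≠ (j : Int) := by simpa using hj
      have heq : (pvStep L pc).getD j 0 = L.getD j 0 := by
        unfold pvStep
        have h0 : 0 ≤ pc.2 := (hb pc List.mem_cons_self).1
        rw [PySem.List.pySetD_of_nonneg _ _ h0]
        rw [List.getD_eq_getElem?_getD, List.getD_eq_getElem?_getD, List.getElem?_set]
        rw [if_neg (by omega)]
      rw [heq]

theorem pv_mem_GW (data : List String) (l : String) (pc : Int × Int) (h : pc ∈ pvGW data l) :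
    ∃ k : Nat, k < data.length ∧ pc.2 = (k : Int) ∧ data.getD k "" = l ∧
      pc.2 - pc.1 ≤ 255 ∧ pc ∈ (pvOcc data l).zip (pvOcc data l).tail := by
  obtain ⟨p1, p2⟩ := pc
  unfold pvGW at h
  obtain ⟨hz, hc⟩ := List.mem_filter.mp h
  have h2 : p2 ∈ (pvOcc data l).tail := (List.of_mem_zip hz).2
  have h2' : p2 ∈ pvOcc data l := List.mem_of_mem_tail h2
  obtain ⟨k, hk, hke, hkl⟩ := (pv_mem_occ data l p2).mp h2'
  exact ⟨k, hk, hke, hkl, by simpa using hc, hz⟩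

theorem pv_WS_nodup (data : List String) : ((pvWS data).map (·.2)).Nodup := by
  unfold pvWS
  rw [List.map_flatten, List.map_map]
  rw [List.nodup_flatten]
  constructor
  · intro g hg
    obtain ⟨l, _, hle⟩ := List.mem_map.mp hg
    have htl : ((pvOcc data l).zip (pvOcc data l).tail).map (·.2) = (pvOcc data l).tail := by
      have := List.map_snd_zip (l₁ := pvOcc data l) (l₂ := (pvOcc data l).tail)
        (by rw [List.length_tail]; omega)
      simpa using this
    have hsub : List.Sublist g (pvOcc data l).tail := by
      rw [← hle, ← htl]
      exact (List.filter_sublist.map _)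
    have hnd : (pvOcc data l).tail.Nodup :=
      ((pv_occ_pairwise data l).imp (fun h => ne_of_lt h)).sublist (List.tail_sublist _)
    exact hnd.sublist hsub
  · rw [List.pairwise_map]
    have hnd : (PySem.Set.ofList data : List String).Nodup := PySem.Set.nodup_ofList data
    refine (List.Pairwise.imp ?_ hnd)
    intro l l' hll x hx hx'
    obtain ⟨pc, hpc, hpe⟩ := List.mem_map.mp hx
    obtain ⟨pc', hpc', hpe'⟩ := List.mem_map.mp hx'
    obtain ⟨k, _, hke, hkl, _, _⟩ := pv_mem_GW data l pc hpc
    obtain ⟨k', _, hke', hkl', _, _⟩ := pv_mem_GW data l' pc' hpc'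
    have hkk : k = k' := by
      have : ((k : Int)) = (k' : Int) := by rw [← hke, ← hke', hpe, hpe']
      omega
    exact hll (by rw [← hkl, ← hkl', hkk])

theorem pv_WS_bounds (data : List String) :
    ∀ pc ∈ pvWS data, 0 ≤ pc.2 ∧ pc.2 < (data.length : Int) := by
  intro pc hm
  obtain ⟨g, hg, hpc⟩ := List.mem_flatten.mp hm
  obtain ⟨l, _, hle⟩ := List.mem_map.mp hg
  obtain ⟨k, hk, hke, _, _, _⟩ := pv_mem_GW data l pc (hle ▸ hpc)
  constructor <;> (rw [hke]; omega)

theorem pv_find_of_mem (ps : List (Int × Int)) :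
    ∀ (pc : Int × Int), (ps.map (·.2)).Nodup → pc ∈ ps → ∀ (j : Int), pc.2 = j →
      ps.find? (fun x => x.2 == j) = some pc := by
  induction ps with
  | nil => intro pc _ hm; simp at hm
  | cons a ps ih =>
    intro pc hnd hm j hj
    by_cases ha : (a.2 == j) = true
    · rw [List.find?_cons_of_pos (p := fun x : Int × Int => x.2 == j) ha]
      rcases List.mem_cons.mp hm with he | ht
    -- a = pc, or pc in the tail which contradicts nodup snds
      · rw [he]
      · exfalso
        have : a.2 ∉ ps.map (·.2) := (List.nodup_cons.mp hnd).1
        refine this ?_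
        have haj : a.2 = j := by simpa using ha
        rw [haj, ← hj]
        exact List.mem_map_of_mem ht
    · rw [List.find?_cons_of_neg (p := fun x : Int × Int => x.2 == j) ha]
      rcases List.mem_cons.mp hm with he | ht
      · exfalso
        apply ha
        rw [← he]
        exact beq_iff_eq.mpr hj
      · exact ih pc (List.nodup_cons.mp hnd).2 ht j hj

theorem pv_getD_mem_data (data : List String) (j : Nat) (hj : j < data.length) :
    data.getD j "" ∈ data := by
  rw [List.getD_eq_getElem?_getD, List.getElem?_eq_getElem hj]
  exact List.getElem_mem hj

-- the unique write hitting position j carries exactly pvDval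
theorem pv_WS_find (data : List String) (j : Nat) (hj : j < data.length) :
    ((pvWS data).find? (fun pc => pc.2 == (j : Int))).elim (0 : Int) (fun pc => pc.2 - pc.1)
      = pvDval data j := by
  have hocc_j : (j : Int) ∈ pvOcc data (data.getD j "") :=
    (pv_mem_occ data _ _).mpr ⟨j, hj, rfl, rfl⟩
  cases hp : pvPrevL data (data.getD j "") j with
  | some p =>
    obtain ⟨hpj, hpl⟩ := pvPrevL_prop data _ j p hp
    have hocc_p : (p : Int) ∈ pvOcc data (data.getD j "") :=
      (pv_mem_occ data _ _).mpr ⟨p, by omega, rfl, hpl⟩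
    have hadj : ((p : Int), (j : Int)) ∈ (pvOcc data (data.getD j "")).zip
        (pvOcc data (data.getD j "")).tail := by
      rw [pv_adj_iff _ (pv_occ_pairwise data _)]
      refine ⟨hocc_p, hocc_j, by omega, ?_⟩
      rintro y hy ⟨hy1, hy2⟩
      obtain ⟨q, hq, hqe, hql⟩ := (pv_mem_occ data _ _).mp hy
      subst hqe
      exact pvPrevL_maximal data _ j p hp q (by omega) (by omega) hql
    by_cases hgap : (j : Int) - (p : Int) ≤ 255
    · -- the write ((p:ℤ),(j:ℤ)) is present and is found
      have hgw : ((p : Int), (j : Int)) ∈ pvGW data (data.getD j "") := by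
        unfold pvGW
        exact List.mem_filter.mpr ⟨hadj, by simpa using hgap⟩
      have hws : ((p : Int), (j : Int)) ∈ pvWS data := by
        unfold pvWS
        exact List.mem_flatten.mpr ⟨pvGW data (data.getD j ""),
          List.mem_map_of_mem (by
            exact (PySem.Set.mem_ofList _ _).mpr (pv_getD_mem_data data j hj)), hgw⟩
      rw [pv_find_of_mem (pvWS data) _ (pv_WS_nodup data) hws (j : Int) rfl]
      unfold pvDval
      rw [hp]
      simp [hgap]
    · -- the pair was filtered out: nothing writes j
      have hnone : (pvWS data).find? (fun pc => pc.2 == (j : Int)) = none := by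
        rw [List.find?_eq_none]
        rintro ⟨pa, pb⟩ hm hbeq
        have hpj2 : pb = (j : Int) := by simpa using hbeq
        obtain ⟨g, hg, hpcg⟩ := List.mem_flatten.mp hm
        obtain ⟨l', hl', hle⟩ := List.mem_map.mp hg
        obtain ⟨k, hk, hke, hkl, hcond, hzip⟩ := pv_mem_GW data l' (pa, pb) (hle ▸ hpcg)
        have hke' : pb = (k : Int) := hke
        have hcond' : pb - pa ≤ 255 := hcond
        have hkj : k = j := by omega
        subst hkj
        have hll : l' = data.getD k "" := hkl.symm
        subst hll
        obtain ⟨hp1, hp2, hplt, hbet⟩ :=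
          (pv_adj_iff _ (pv_occ_pairwise data _) pa pb).mp hzip
        obtain ⟨p', hp'n, hp'e, hp'l⟩ := (pv_mem_occ data _ _).mp hp1
        have hprev : pvPrevL data (data.getD k "") k = some p' := by
          apply pvPrevL_complete data _ k p' (by omega) hp'l
          intro q h1 h2 hql
          have hyq : (q : Int) ∈ pvOcc data (data.getD k "") :=
            (pv_mem_occ data _ _).mpr ⟨q, by omega, rfl, hql⟩
          exact hbet (q : Int) hyq ⟨by omega, by omega⟩
        rw [hp] at hprev
        injection hprev with hprev
        omega
      rw [hnone]
      unfold pvDval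
      rw [hp]
      simp [hgap]
  | none =>
    have hnone : (pvWS data).find? (fun pc => pc.2 == (j : Int)) = none := by
      rw [List.find?_eq_none]
      rintro ⟨pa, pb⟩ hm hbeq
      have hpj2 : pb = (j : Int) := by simpa using hbeq
      obtain ⟨g, hg, hpcg⟩ := List.mem_flatten.mp hm
      obtain ⟨l', hl', hle⟩ := List.mem_map.mp hg
      obtain ⟨k, hk, hke, hkl, hcond, hzip⟩ := pv_mem_GW data l' (pa, pb) (hle ▸ hpcg)
      have hke' : pb = (k : Int) := hke
      have hkj : k = j := by omega
      subst hkj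
      have hll : l' = data.getD k "" := hkl.symm
      subst hll
      obtain ⟨hp1, hp2, hplt, hbet⟩ :=
        (pv_adj_iff _ (pv_occ_pairwise data _) pa pb).mp hzip
      obtain ⟨p', hp'n, hp'e, hp'l⟩ := (pv_mem_occ data _ _).mp hp1
      have hprev : pvPrevL data (data.getD k "") k = some p' := by
        apply pvPrevL_complete data _ k p' (by omega) hp'l
        intro q h1 h2 hql
        have hyq : (q : Int) ∈ pvOcc data (data.getD k "") :=
          (pv_mem_occ data _ _).mpr ⟨q, by omega, rfl, hql⟩
        exact hbet (q : Int) hyq ⟨by omega, by omega⟩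
      rw [hp] at hprev
      simp at hprev
    rw [hnone]
    unfold pvDval
    rw [hp]
    rfl

theorem pv_dval_nonneg (data : List String) (j : Nat) : 0 ≤ pvDval data j := by
  unfold pvDval
  cases hp : pvPrevL data (data.getD j "") j with
  | none => exact Int.le_refl 0
  | some p =>
    have := (pvPrevL_prop data _ j p hp).1
    show (0 : Int) ≤ if (j : Int) - (p : Int) ≤ 255 then (j : Int) - (p : Int) else 0
    split_ifs <;> omega

-- B's whole delta computation produces exactly the spec deltas
theorem pv_B_delta (data : List String) :
    (((PySem.List.enumerate data 0).foldl
      (fun (occs : PySem.Dict String (List Int)) il => occs.modify il.2 [] (· ++ [il.1]))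
      PySem.Dict.empty).values).foldl
      (fun (delta : List Int) idxs =>
        (idxs.zip (PySem.List.slice idxs (some 1) none)).foldl
          (fun (delta : List Int) pc =>
            if pc.2 - pc.1 ≤ 255 then PySem.List.pySetD delta pc.2 (pc.2 - pc.1) else delta)
          delta)
      (List.replicate data.length 0) = pvDspec data := by
  have hv : ((PySem.List.enumerate data 0).foldl
      (fun (occs : PySem.Dict String (List Int)) il => occs.modify il.2 [] (· ++ [il.1]))
      PySem.Dict.empty).values = (PySem.Set.ofList data).map (pvOcc data) := by
    rw [PySem.Dict.values_eq_map_keys _ (pv_occs_keys_nodup data) []]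
    rw [pv_occs_keys]
    exact List.map_congr_left (fun l _ => pv_occs_getD data l)
  rw [hv, List.foldl_map]
  have hstep : (fun (delta : List Int) (l : String) =>
      ((pvOcc data l).zip (PySem.List.slice (pvOcc data l) (some 1) none)).foldl
        (fun (delta : List Int) pc =>
          if pc.2 - pc.1 ≤ 255 then PySem.List.pySetD delta pc.2 (pc.2 - pc.1) else delta)
        delta)
      = fun (delta : List Int) (l : String) => (pvGW data l).foldl pvStep delta := by
    funext L l
    rw [PySem.List.slice_from_one]
    unfold pvGW pvStep
    rw [List.foldl_filter]
    simp only [decide_eq_true_eq]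
  rw [hstep]
  have hws : (PySem.Set.ofList data).foldl
      (fun (delta : List Int) l => (pvGW data l).foldl pvStep delta)
      (List.replicate data.length 0)
      = (pvWS data).foldl pvStep (List.replicate data.length 0) := by
    unfold pvWS
    rw [List.foldl_flatten, List.foldl_map]
  rw [hws]
  apply List.ext_getElem
  · rw [pv_stepfold_length]; simp [pvDspec]
  · intro j h1 h2
    have hj : j < data.length := by simpa [pvDspec] using h2
    have hgetd : ((pvWS data).foldl pvStep (List.replicate data.length 0)).getD j 0
        = pvDval data j := by
      rw [pv_stepfold_getD (pvWS data) _ j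
        (by rw [List.length_replicate]; exact pv_WS_bounds data) (pv_WS_nodup data)]
      have hz : (List.replicate data.length (0 : Int)).getD j 0 = 0 := by
        rw [List.getD_eq_getElem?_getD]
        rcases Nat.lt_or_ge j data.length with h | h
        · simp [h]
        · simp
      rw [hz]
      exact pv_WS_find data j hj
    rw [List.getD_eq_getElem?_getD, List.getElem?_eq_getElem h1] at hgetd
    simp only [Option.getD_some] at hgetd
    rw [hgetd]
    simp [pvDspec]

theorem pv_map_filter_eq_filterMap {α β : Type} (p : α → Bool) (f : α → β) (l : List α) :
    (l.filter p).map f = l.filterMap (fun a => if p a then some (f a) else none) := by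
  induction l with
  | nil => rfl
  | cons a l ih =>
    by_cases hp : p a <;> simp [hp, ih]

-- A's mapping loop and B's range comprehension read off the same deltas
theorem pv_mapping_eq (data : List String) :
    (PySem.List.enumerate (pvDspec data) 0).filterMap
      (fun id => if id.2 > 0 then none else some (PySem.List.pyGetD data id.1 ""))
    = ((PySem.List.pyRange 0 (data.length : Int) 1).filter
        (fun i => PySem.List.pyGetD (pvDspec data) i 0 == 0)).map
      (fun i => PySem.List.pyGetD data i "") := by
  rw [PySem.List.enumerate_eq_map_pyRange (pvDspec data) 0]
  rw [List.filterMap_map]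
  rw [pv_map_filter_eq_filterMap]
  have hlen : PySem.List.len (pvDspec data) = (data.length : Int) := by simp [pvDspec]
  rw [hlen]
  apply List.filterMap_congr
  intro q hq
  obtain ⟨h0, h1⟩ := (PySem.List.mem_pyRange_one).mp hq
  obtain ⟨k, rfl⟩ : ∃ k : Nat, q = (k : Int) := ⟨q.toNat, by omega⟩
  have hk : k < data.length := by omega
  have hval : PySem.List.pyGetD (pvDspec data) (k : Int) 0 = pvDval data k := by
    rw [PySem.List.pyGetD_natCast, List.getD_eq_getElem?_getD]
    simp [pvDspec, hk]
  simp only [Function.comp_apply, hval]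
  have hnn := pv_dval_nonneg data k
  by_cases hz : pvDval data k = 0
  · simp [hz]
  · have hpos : pvDval data k > 0 := by omega
    simp [hz, hpos]

-- ===== VERDICT (by name: the statement is the Claim_ definition above) =====
theorem backptr_regex_spec : Claim_equal_backptr_regex := by
  intro data _
  show backptr_regex data = backptr_regex_alt data
  have hA : backptr_regex data
      = ("" ++ PySem.Str.join "" ((PySem.List.enumerate (pvDspec data) 0).map
          (fun id => if id.2 > 0 then "\\x" ++ pvHex02 id.2
                     else "[\\x00\\x" ++ pvHex02 (id.1 + 1) ++ "-\\xff]")),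
         [] ++ (PySem.List.enumerate (pvDspec data) 0).filterMap
          (fun id => if id.2 > 0 then none else some (PySem.List.pyGetD data id.1 ""))) := by
    unfold backptr_regex backptr_pattern
    rw [pv_pattern_fold data 0 PySem.Dict.empty []]
    simp only [List.nil_append]
    rw [pvDeltas_zero data, pv_A_second data (pvDspec data) 0 "" []]
    simp only [List.nil_append]
  rw [hA]
  simp only [backptr_regex_alt]
  rw [pv_B_delta data]
  refine Prod.ext ?_ ?_
  · simp
  · simp only [List.nil_append]
    exact pv_mapping_eq data
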